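-- pv_equiv track=rewrite | github.com/BranislavModriansky/peregrin | 05_ui/utils/Function.py | FindMatchingColumn
-- ===== SOURCE A (Python) =====
-- from typing import List, Any
--
-- def FindMatchingColumn(columns: List[str], lookfor: List[str]) -> str:
--     """
--     Looks for matches with any of the provided strings.
--     - First tries exact matches.
--     - Then checks if the column starts with any of given terms.
--     - Finally checks if any term is a substring of the column name.
--     If no match is found, returns None.
--     """
--
--     # Normalize columns for matching
--     normalized_columns = [
--         (col, str(col).replace('_', ' ').strip().lower() if col is not None else '') for col in columns
--     ]
--     # Try exact matches first
--     for col, norm_col in normalized_columns: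
--         for look in lookfor:
--             if norm_col == look.lower():
--                 return col
--     # Then try startswith
--     for col, norm_col in normalized_columns:
--         for look in lookfor:
--             if norm_col.startswith(look.lower()):
--                 return col
--     # Then try substring
--     for col, norm_col in normalized_columns:
--         for look in lookfor:
--             if look.lower() in norm_col:
--                 return col
--     return None
-- ===== SOURCE B (Python) =====
-- def FindMatchingColumn(columns, lookfor):
--     """Single pass: per column compute its best match tier (1 exact, 2 prefix,
--     3 substring); return immediately on exact, else keep the earliest column
--     with the smallest tier."""
--     looks = [look.lower() for look in lookfor]
--     best = None  # (tier, col)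
--     for col in columns:
--         norm_col = str(col).replace('_', ' ').strip().lower() if col is not None else ''
--         if any(norm_col == l for l in looks):
--             return col
--         if any(norm_col.startswith(l) for l in looks):
--             t = 2
--         elif any(l in norm_col for l in looks):
--             t = 3
--         else:
--             continue
--         if best is None or t < best[0]:
--             best = (t, col)
--     return best[1] if best else None
-- ===== Notes on version B (the rewrite author's own statement) =====
-- stated objective: alternative
-- what changed: Replaced A's three sequential full passes (exact, then prefix, then substring) over the normalized columns by a single pass that computes each column's best match tier, returns immediately on an exact match, and otherwise tracks the earliest column with the smallest tier.
import Mathlib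
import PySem

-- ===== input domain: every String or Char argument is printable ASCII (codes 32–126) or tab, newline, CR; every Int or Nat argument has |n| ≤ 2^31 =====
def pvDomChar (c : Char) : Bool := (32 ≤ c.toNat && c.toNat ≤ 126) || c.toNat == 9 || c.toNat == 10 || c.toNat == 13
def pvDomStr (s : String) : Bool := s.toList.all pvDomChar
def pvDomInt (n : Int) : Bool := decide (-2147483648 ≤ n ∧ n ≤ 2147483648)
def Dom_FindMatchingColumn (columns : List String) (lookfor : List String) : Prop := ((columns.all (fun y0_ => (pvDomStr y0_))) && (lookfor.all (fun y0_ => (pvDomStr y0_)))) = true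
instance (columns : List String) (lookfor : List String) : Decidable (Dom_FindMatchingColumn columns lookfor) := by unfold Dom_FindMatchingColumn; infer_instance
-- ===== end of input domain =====

-- B replaces A's three sequential passes (exact / prefix / substring) by a single pass that tiers each column and tracks the earliest best tier (objective: alternative, same cost).



-- ===== PORT A =====
-- normalization shared by both Pythons: str(col).replace('_',' ').strip().lower()
def pvNorm (c : String) : String :=
  PySem.Str.lower (PySem.Str.strip (PySem.Str.replace c "_" " "))

-- three sequential passes over the normalized (col, norm_col) pairs, as in A
def FindMatchingColumn (columns : List String) (lookfor : List String) : Option String :=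
  let normalized := columns.map (fun col => (col, pvNorm col))
  match normalized.find? (fun p => lookfor.any (fun look => p.2 == PySem.Str.lower look)) with
  | some p => some p.1
  | none =>
    match normalized.find? (fun p => lookfor.any (fun look => PySem.Str.startswith p.2 (PySem.Str.lower look))) with
    | some p => some p.1
    | none =>
      match normalized.find? (fun p => lookfor.any (fun look => PySem.Str.isIn (PySem.Str.lower look) p.2)) with
      | some p => some p.1
      | none => none

-- ===== PORT B =====
-- tier of a normalized column name against the (already lowered) terms
def pvTier (looks : List String) (nc : String) : Nat :=
  if looks.any (fun l => nc == l) then 1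
  else if looks.any (fun l => PySem.Str.startswith nc l) then 2
  else if looks.any (fun l => PySem.Str.isIn l nc) then 3
  else 4

-- single pass: early return on tier 1, continue on tier 4, else keep the
-- earliest (tier, col) with the smallest tier
def pvGo (looks : List String) : List String → Option (Nat × String) → Option String
  | [], best => best.map Prod.snd
  | col :: rest, best =>
    let t := pvTier looks (pvNorm col)
    if t = 1 then some col
    else if t = 4 then pvGo looks rest best
    else if (match best with | none => true | some b => decide (t < b.1)) then
      pvGo looks rest (some (t, col))
    else pvGo looks rest best

def FindMatchingColumn_alt (columns : List String) (lookfor : List String) : Option String :=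
  pvGo (lookfor.map PySem.Str.lower) columns none

-- ===== PRECONDITION & SPEC =====
def Spec_FindMatchingColumn (columns : List String) (lookfor : List String) (out : Option String) : Prop := out = FindMatchingColumn_alt columns lookfor
instance (columns : List String) (lookfor : List String) (out : Option String) : Decidable (Spec_FindMatchingColumn columns lookfor out) := by unfold Spec_FindMatchingColumn; infer_instance

-- ===== CLAIM (what is proved, stated in full; the proofs are below) =====
def Claim_equal_FindMatchingColumn : Prop := ∀ (columns : List String) (lookfor : List String), Dom_FindMatchingColumn columns lookfor → Spec_FindMatchingColumn columns lookfor (FindMatchingColumn columns lookfor)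

-- ===== LEMMAS AND PROOFS =====

-- first column whose tier is ≤ k
def pvFirstT (looks : List String) (k : Nat) (cols : List String) : Option String :=
  cols.find? (fun c => decide (pvTier looks (pvNorm c) ≤ k))

theorem pvTier_bounds (looks : List String) (nc : String) :
    1 ≤ pvTier looks nc ∧ pvTier looks nc ≤ 4 := by
  unfold pvTier; split_ifs <;> omega

theorem pv_exact_imp_start {looks : List String} {nc : String}
    (h : looks.any (fun l => nc == l) = true) :
    looks.any (fun l => PySem.Str.startswith nc l) = true := by
  rcases List.any_eq_true.mp h with ⟨l, hl, hb⟩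
  refine List.any_eq_true.mpr ⟨l, hl, ?_⟩
  have hnc : nc = l := by simpa using hb
  subst hnc
  simpa using (PySem.Chars.startswith_iff nc.toList nc.toList).mpr (List.prefix_refl _)

theorem pv_start_imp_in {looks : List String} {nc : String}
    (h : looks.any (fun l => PySem.Str.startswith nc l) = true) :
    looks.any (fun l => PySem.Str.isIn l nc) = true := by
  rcases List.any_eq_true.mp h with ⟨l, hl, hb⟩
  refine List.any_eq_true.mpr ⟨l, hl, ?_⟩
  rw [PySem.Str.isIn_iff_infix]
  exact ((PySem.Chars.startswith_iff _ _).mp (by simpa using hb)).isInfix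

theorem pv_any_exact_eq (looks : List String) (nc : String) :
    looks.any (fun l => nc == l) = decide (pvTier looks nc ≤ 1) := by
  unfold pvTier
  cases h1 : looks.any (fun l => nc == l)
  · split_ifs <;> simp_all
  · simp

theorem pv_any_start_eq (looks : List String) (nc : String) :
    looks.any (fun l => PySem.Str.startswith nc l) = decide (pvTier looks nc ≤ 2) := by
  unfold pvTier
  cases h1 : looks.any (fun l => nc == l)
  · cases h2 : looks.any (fun l => PySem.Str.startswith nc l)
    · split_ifs <;> simp_all
    · simp
  · rw [pv_exact_imp_start h1]; simp

theorem pv_any_in_eq (looks : List String) (nc : String) :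
    looks.any (fun l => PySem.Str.isIn l nc) = decide (pvTier looks nc ≤ 3) := by
  unfold pvTier
  cases h1 : looks.any (fun l => nc == l)
  · cases h2 : looks.any (fun l => PySem.Str.startswith nc l)
    · cases h3 : looks.any (fun l => PySem.Str.isIn l nc)
      · simp
      · simp
    · rw [pv_start_imp_in h2]; simp
  · rw [pv_start_imp_in (pv_exact_imp_start h1)]; simp

-- A is the chain of the three first-tier searches
theorem pv_A_eq (columns lookfor : List String) :
    FindMatchingColumn columns lookfor =
      ((pvFirstT (lookfor.map PySem.Str.lower) 1 columns).orElse fun _ =>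
        (pvFirstT (lookfor.map PySem.Str.lower) 2 columns).orElse fun _ =>
          pvFirstT (lookfor.map PySem.Str.lower) 3 columns) := by
  unfold FindMatchingColumn pvFirstT
  have e1 : ∀ c : String, (lookfor.any fun look => pvNorm c == PySem.Str.lower look)
      = decide (pvTier (lookfor.map PySem.Str.lower) (pvNorm c) ≤ 1) := by
    intro c; rw [← pv_any_exact_eq, List.any_map]; simp only [Function.comp_def]
  have e2 : ∀ c : String,
      (lookfor.any fun look => PySem.Str.startswith (pvNorm c) (PySem.Str.lower look))
      = decide (pvTier (lookfor.map PySem.Str.lower) (pvNorm c) ≤ 2) := by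
    intro c; rw [← pv_any_start_eq, List.any_map]; simp only [Function.comp_def]
  have e3 : ∀ c : String,
      (lookfor.any fun look => PySem.Str.isIn (PySem.Str.lower look) (pvNorm c))
      = decide (pvTier (lookfor.map PySem.Str.lower) (pvNorm c) ≤ 3) := by
    intro c; rw [← pv_any_in_eq, List.any_map]; simp only [Function.comp_def]
  simp only [List.find?_map, Function.comp_def, e1, e2, e3]
  cases h1 : columns.find? (fun c => decide (pvTier (lookfor.map PySem.Str.lower) (pvNorm c) ≤ 1)) <;>
    cases h2 : columns.find? (fun c => decide (pvTier (lookfor.map PySem.Str.lower) (pvNorm c) ≤ 2)) <;>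
      cases h3 : columns.find? (fun c => decide (pvTier (lookfor.map PySem.Str.lower) (pvNorm c) ≤ 3)) <;>
        simp [Option.orElse]

theorem pv_go_two (looks : List String) (cols : List String) (c : String) :
    pvGo looks cols (some (2, c)) =
      (pvFirstT looks 1 cols).orElse fun _ => some c := by
  induction cols with
  | nil => simp [pvGo, pvFirstT, Option.orElse]
  | cons x rest ih =>
    have hb := pvTier_bounds looks (pvNorm x)
    have ht : pvTier looks (pvNorm x) = 1 ∨ pvTier looks (pvNorm x) = 2 ∨
        pvTier looks (pvNorm x) = 3 ∨ pvTier looks (pvNorm x) = 4 := by omega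
    rcases ht with h | h | h | h <;>
      simp [pvGo, pvFirstT, h, Option.orElse, ih] at ih ⊢

theorem pv_go_three (looks : List String) (cols : List String) (c : String) :
    pvGo looks cols (some (3, c)) =
      (pvFirstT looks 1 cols).orElse fun _ =>
        (pvFirstT looks 2 cols).orElse fun _ => some c := by
  induction cols with
  | nil => simp [pvGo, pvFirstT, Option.orElse]
  | cons x rest ih =>
    have hb := pvTier_bounds looks (pvNorm x)
    have ht : pvTier looks (pvNorm x) = 1 ∨ pvTier looks (pvNorm x) = 2 ∨
        pvTier looks (pvNorm x) = 3 ∨ pvTier looks (pvNorm x) = 4 := by omega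
    rcases ht with h | h | h | h <;>
      simp [pvGo, pvFirstT, h, Option.orElse, ih, pv_go_two] at ih ⊢

theorem pv_go_none (looks : List String) (cols : List String) :
    pvGo looks cols none =
      (pvFirstT looks 1 cols).orElse fun _ =>
        (pvFirstT looks 2 cols).orElse fun _ => pvFirstT looks 3 cols := by
  induction cols with
  | nil => simp [pvGo, pvFirstT, Option.orElse]
  | cons x rest ih =>
    have hb := pvTier_bounds looks (pvNorm x)
    have ht : pvTier looks (pvNorm x) = 1 ∨ pvTier looks (pvNorm x) = 2 ∨
        pvTier looks (pvNorm x) = 3 ∨ pvTier looks (pvNorm x) = 4 := by omega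
    rcases ht with h | h | h | h <;>
      simp [pvGo, pvFirstT, h, Option.orElse, ih, pv_go_two, pv_go_three] at ih ⊢

-- ===== VERDICT (by name: the statement is the Claim_ definition above) =====
theorem FindMatchingColumn_spec : Claim_equal_FindMatchingColumn := by
  intro columns lookfor _
  show FindMatchingColumn columns lookfor = FindMatchingColumn_alt columns lookfor
  rw [pv_A_eq, FindMatchingColumn_alt, pv_go_none]
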